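-- pv_equiv track=rewrite | github.com/qkzk/qkzk.github.io | docs/nsi/cours_premiere/donnees_simples/chaines_caracteres/2_td/latin_cochon.py | phrase_latin_cochon2
-- ===== SOURCE A (Python) =====
-- CONSONNES = "BCDFGHJKLMNPQRSTVWXZ"
--
-- def mot_latin_cochon2(mot: str) -> str:
--     """Version sans slice"""
--     if mot[0] in CONSONNES:
--         mot_encode = ""
--         for indice in range(1, len(mot)):
--             mot_encode = mot_encode + mot[indice]
--         mot_encode = mot_encode + mot[0]
--         mot_encode = mot_encode + "UM"
--     else:
--         mot_encode = mot
--     return mot_encode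
--
-- def phrase_latin_cochon2(phrase: str) -> str:
--     """Version sans join ou split"""
--     phrase_encodee = ""
--     courant = ""
--     for indice in range(len(phrase)):
--         if phrase[indice] != " ":
--             courant = courant + phrase[indice]
--         else:
--             mot_encode = mot_latin_cochon2(courant)
--             phrase_encodee = phrase_encodee + mot_encode + " "
--             courant = ""
--     # ne pas oublier le dernier mot...
--     mot_encode = mot_latin_cochon2(courant)
--     phrase_encodee = phrase_encodee + mot_encode
--
--     return phrase_encodee
-- ===== SOURCE B (Python) =====
-- CONSONNES = "BCDFGHJKLMNPQRSTVWXZ"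
--
-- def _mot_latin(mot: str) -> str:
--     if mot[0] in CONSONNES:
--         return mot[1:] + mot[0] + "UM"
--     return mot
--
-- def phrase_latin_cochon2(phrase: str) -> str:
--     return " ".join(_mot_latin(mot) for mot in phrase.split(" "))
-- ===== Notes on version B (the rewrite author's own statement) =====
-- stated objective: idiomatic
-- what changed: Replaced the char-by-char scan with an explicit word buffer (and the index loop rebuilding each word) by the idiomatic split(" ") / per-word slicing (mot[1:] + mot[0] + "UM") / " ".join decomposition; join avoids A's quadratic repeated string concatenation.
import Mathlib
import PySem

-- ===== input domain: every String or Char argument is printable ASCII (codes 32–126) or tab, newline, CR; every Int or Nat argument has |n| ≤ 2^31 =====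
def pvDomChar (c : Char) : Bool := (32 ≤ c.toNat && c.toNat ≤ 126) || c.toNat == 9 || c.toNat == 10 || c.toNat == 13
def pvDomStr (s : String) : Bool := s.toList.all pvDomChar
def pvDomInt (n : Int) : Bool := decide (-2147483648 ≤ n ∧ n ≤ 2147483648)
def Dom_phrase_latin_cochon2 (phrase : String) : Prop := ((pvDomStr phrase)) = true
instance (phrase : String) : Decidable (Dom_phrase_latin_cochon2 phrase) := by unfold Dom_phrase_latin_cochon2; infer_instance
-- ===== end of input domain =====

-- B replaces A's char-by-char scan with a buffer by an idiomatic split(" ")/map/join with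
-- word slicing; equivalence of the RETURN value is proved on phrases with no empty word
-- (both Pythons raise IndexError on an empty word).

-- ===== PORT A =====
def pvConsonnes : List Char := "BCDFGHJKLMNPQRSTVWXZ".toList

-- mot_latin_cochon2: mot[0] raises IndexError on the empty word (excluded by Pre_);
-- here it is ported as headD ' ' (only ever read inside Pre_).
def pvMotA (mot : List Char) : List Char :=
  if mot.headD ' ' ∈ pvConsonnes then
    -- for indice in range(1, len(mot)): mot_encode = mot_encode + mot[indice]
    let motEncode := (mot.drop 1).foldl (fun acc c => acc ++ [c]) []
    let motEncode := motEncode ++ [mot.headD ' ']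
    motEncode ++ ['U', 'M']
  else
    mot

-- the main loop over the characters of phrase, state = (phrase_encodee, courant)
def pvLoopA : List Char → List Char → List Char → List Char
  | [], phraseEncodee, courant => phraseEncodee ++ pvMotA courant
  | c :: rest, phraseEncodee, courant =>
      if c ≠ ' ' then
        pvLoopA rest phraseEncodee (courant ++ [c])
      else
        pvLoopA rest (phraseEncodee ++ pvMotA courant ++ [' ']) []

def phrase_latin_cochon2 (phrase : String) : String :=
  String.ofList (pvLoopA phrase.toList [] [])

-- ===== PORT B =====
-- hand port of phrase.split(" ") (empty pieces kept, exactly Python's split with an explicit separator)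
def pvSplitSp : List Char → List (List Char)
  | [] => [[]]
  | c :: rest =>
      if c = ' ' then [] :: pvSplitSp rest
      else
        match pvSplitSp rest with
        | p :: ps => (c :: p) :: ps
        | [] => [[c]]

-- _mot_latin: mot[1:] + mot[0] + "UM"; mot[0] ported as headD ' ' (IndexError outside Pre_)
def pvMotB (mot : List Char) : List Char :=
  if mot.headD ' ' ∈ pvConsonnes then
    mot.drop 1 ++ [mot.headD ' '] ++ ['U', 'M']
  else
    mot

def phrase_latin_cochon2_alt (phrase : String) : String :=
  String.ofList (List.intercalate [' '] ((pvSplitSp phrase.toList).map pvMotB))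

-- ===== PRECONDITION & SPEC =====
-- Pre_ excludes exactly the phrases with an empty word (empty phrase, leading/trailing
-- space, two consecutive spaces): there both Pythons raise IndexError on mot[0].
def Pre_phrase_latin_cochon2 (phrase : String) : Prop :=
  phrase.toList ≠ [] ∧ phrase.toList.head? ≠ some ' ' ∧
  phrase.toList.getLast? ≠ some ' ' ∧ ¬ ([' ', ' '] <:+: phrase.toList)
instance (phrase : String) : Decidable (Pre_phrase_latin_cochon2 phrase) := by
  unfold Pre_phrase_latin_cochon2; infer_instance

def pvWitness_phrase_latin_cochon2 : String := "BONJOUR LE MONDE"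

def Spec_phrase_latin_cochon2 (phrase : String) (out : String) : Prop := out = phrase_latin_cochon2_alt phrase
instance (phrase : String) (out : String) : Decidable (Spec_phrase_latin_cochon2 phrase out) := by unfold Spec_phrase_latin_cochon2; infer_instance

-- ===== CLAIM (what is proved, stated in full; the proofs are below) =====
def Claim_equal_phrase_latin_cochon2 : Prop := ∀ (phrase : String), Dom_phrase_latin_cochon2 phrase → Pre_phrase_latin_cochon2 phrase → Spec_phrase_latin_cochon2 phrase (phrase_latin_cochon2 phrase)

-- ===== LEMMAS AND PROOFS =====

theorem pvMotA_eq_pvMotB (mot : List Char) : pvMotA mot = pvMotB mot := by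
  unfold pvMotA pvMotB
  rw [PySem.List.foldl_append_singleton]
  simp

theorem pvSplitSp_ne_nil (l : List Char) : pvSplitSp l ≠ [] := by
  cases l with
  | nil => simp [pvSplitSp]
  | cons c rest =>
    simp only [pvSplitSp]
    split
    · simp
    · cases h : pvSplitSp rest <;> simp

-- intercalate over two or more pieces peels off the first piece and one separator
theorem pvIntercalate_cons₂ (sep a b : List Char) (l : List (List Char)) :
    List.intercalate sep (a :: b :: l) = a ++ sep ++ List.intercalate sep (b :: l) := by
  simp [List.intercalate]

-- the main loop invariant: pvLoopA equals "join with spaces of the encoded words",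
-- where the pending buffer `courant` is prepended to the first remaining word
theorem pvLoopA_eq (l : List Char) : ∀ (acc courant : List Char),
    pvLoopA l acc courant =
      acc ++ List.intercalate [' ']
        ((match pvSplitSp l with
          | p :: ps => (courant ++ p) :: ps
          | [] => [courant]).map pvMotA) := by
  induction l with
  | nil => intro acc courant; simp [pvLoopA, pvSplitSp, List.intercalate]
  | cons c rest ih =>
    intro acc courant
    by_cases hc : c = ' '
    · subst hc
      have h1 : pvLoopA (' ' :: rest) acc courant
          = pvLoopA rest (acc ++ pvMotA courant ++ [' ']) [] := by simp [pvLoopA]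
      obtain ⟨p, ps, hps⟩ : ∃ p ps, pvSplitSp rest = p :: ps := by
        cases h : pvSplitSp rest with
        | nil => exact absurd h (pvSplitSp_ne_nil rest)
        | cons p ps => exact ⟨p, ps, rfl⟩
      have h2 : pvSplitSp (' ' :: rest) = [] :: p :: ps := by simp [pvSplitSp, hps]
      rw [h1, ih, hps, h2]
      simp [pvIntercalate_cons₂]
    · have h1 : pvLoopA (c :: rest) acc courant = pvLoopA rest acc (courant ++ [c]) := by
        simp [pvLoopA, hc]
      rw [h1, ih]
      simp only [pvSplitSp, if_neg hc]
      cases h : pvSplitSp rest with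
      | nil => exact absurd h (pvSplitSp_ne_nil rest)
      | cons p ps => simp

-- ===== VERDICT (by name: the statement is the Claim_ definition above) =====
theorem phrase_latin_cochon2_spec : Claim_equal_phrase_latin_cochon2 := by
  intro phrase _ _
  unfold Spec_phrase_latin_cochon2 phrase_latin_cochon2 phrase_latin_cochon2_alt
  rw [pvLoopA_eq]
  cases h : pvSplitSp phrase.toList with
  | nil => exact absurd h (pvSplitSp_ne_nil phrase.toList)
  | cons p ps => simp [funext pvMotA_eq_pvMotB]
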